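-- pv_equiv track=rewrite | github.com/newearthmartin/advent2023 | 19.py | add_constraint
-- ===== SOURCE A (Python) =====
-- def contradicts(constraints, constraint):
--     name, comp, value = constraint
--     return any((comp == '<' and value <= v) or (comp == '>' and value >= v)
--                for n, c, v in constraints
--                if name == n and comp != c)
--
-- def add_constraint(constraints, constraint):
--     if contradicts(constraints, constraint):
--         return None
--     rv = constraints.copy()
--     name, comp, value = constraint
--     for i in range(len(rv)):
--         n, c, v = rv[i]
--         if n == name and c == comp:
--             rv[i] = (n, c, max(v, value) if comp == '>' else min(v, value))
--             return rv
--     rv.append(constraint)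
--     return rv
-- ===== SOURCE B (Python) =====
-- def add_constraint(constraints, constraint):
--     name, comp, value = constraint
--     rv = list(constraints)
--     merge = None
--     for i, (n, c, v) in enumerate(rv):
--         if n == name:
--             if c != comp:
--                 if (comp == '<' and value <= v) or (comp == '>' and value >= v):
--                     return None
--             elif merge is None:
--                 merge = (i, (n, c, v))
--     if merge is None:
--         rv.append(constraint)
--     else:
--         i, (n, c, v) = merge
--         rv[i] = (n, c, max(v, value) if comp == '>' else min(v, value))
--     return rv
-- ===== Notes on version B (the rewrite author's own statement) =====
-- stated objective: alternative
-- what changed: Fuses A's two scans (a separate 'contradicts' pass plus an index loop that re-scans for the first same-comparator entry) into a single enumerate loop that returns None on a contradiction anywhere and records the first merge candidate, patching or appending after the loop.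
import Mathlib
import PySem

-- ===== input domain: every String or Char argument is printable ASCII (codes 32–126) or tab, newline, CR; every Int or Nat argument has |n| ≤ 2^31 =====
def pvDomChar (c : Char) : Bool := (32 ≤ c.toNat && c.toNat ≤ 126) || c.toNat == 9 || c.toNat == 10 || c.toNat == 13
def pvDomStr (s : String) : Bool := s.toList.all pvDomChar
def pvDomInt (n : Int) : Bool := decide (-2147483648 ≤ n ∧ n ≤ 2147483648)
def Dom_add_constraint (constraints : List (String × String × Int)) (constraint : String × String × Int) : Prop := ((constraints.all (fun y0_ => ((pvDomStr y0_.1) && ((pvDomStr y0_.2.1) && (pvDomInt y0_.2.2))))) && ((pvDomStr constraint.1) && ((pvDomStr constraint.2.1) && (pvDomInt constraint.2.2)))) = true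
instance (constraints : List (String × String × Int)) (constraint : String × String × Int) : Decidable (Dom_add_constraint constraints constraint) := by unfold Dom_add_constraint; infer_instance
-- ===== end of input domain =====

-- B replaces A's two scans (a 'contradicts' pass plus an index loop) by one fused pass; proved equal on all inputs.

-- ===== PORT A =====
-- contradicts: any(... for n,c,v in constraints if name==n and comp!=c)
def contradicts (constraints : List (String × String × Int)) (constraint : String × String × Int) : Bool :=
  let (name, comp, value) := constraint
  constraints.any (fun t =>
    let (n, c, v) := t
    (name == n && comp != c) &&
      ((comp == "<" && decide (value ≤ v)) || (comp == ">" && decide (value ≥ v))))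

-- the 'for i in range(len(rv))' loop: replace the first (n,c,v) with n==name, c==comp and return,
-- none if the loop falls through
def aMergeLoop (name comp : String) (value : Int) : List (String × String × Int) → Option (List (String × String × Int))
  | [] => none
  | (n, c, v) :: rest =>
      if n == name && c == comp then
        some ((n, c, if comp == ">" then max v value else min v value) :: rest)
      else
        (aMergeLoop name comp value rest).map (fun l => (n, c, v) :: l)

def add_constraint (constraints : List (String × String × Int)) (constraint : String × String × Int) : Option (List (String × String × Int)) :=
  if contradicts constraints constraint then none
  else
    let (name, comp, value) := constraint
    match aMergeLoop name comp value constraints with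
    | some rv => some rv
    | none => some (constraints ++ [constraint])

-- ===== PORT B =====
-- the single enumerate loop: `none` = Python's early `return None` on a contradiction;
-- `some merge` = loop finished with the recorded first merge candidate (index, entry)
def bScan (name comp : String) (value : Int) :
    List (String × String × Int) → Nat → Option (Nat × String × String × Int) →
    Option (Option (Nat × String × String × Int))
  | [], _, merge => some merge
  | (n, c, v) :: rest, i, merge =>
      if n == name then
        if c != comp then
          if (comp == "<" && decide (value ≤ v)) || (comp == ">" && decide (value ≥ v)) then
            none
          else bScan name comp value rest (i + 1) merge
        else
          match merge with
          | none => bScan name comp value rest (i + 1) (some (i, n, c, v))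
          | some m => bScan name comp value rest (i + 1) (some m)
      else bScan name comp value rest (i + 1) merge

def add_constraint_alt (constraints : List (String × String × Int)) (constraint : String × String × Int) : Option (List (String × String × Int)) :=
  let (name, comp, value) := constraint
  match bScan name comp value constraints 0 none with
  | none => none
  | some none => some (constraints ++ [constraint])
  | some (some (i, n, c, v)) =>
      some (constraints.set i (n, c, if comp == ">" then max v value else min v value))

-- ===== PRECONDITION & SPEC =====
def Spec_add_constraint (constraints : List (String × String × Int)) (constraint : String × String × Int) (out : Option (List (String × String × Int))) : Prop := out = add_constraint_alt constraints constraint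
instance (constraints : List (String × String × Int)) (constraint : String × String × Int) (out : Option (List (String × String × Int))) : Decidable (Spec_add_constraint constraints constraint out) := by unfold Spec_add_constraint; infer_instance

-- ===== CLAIM (what is proved, stated in full; the proofs are below) =====
def Claim_equal_add_constraint : Prop := ∀ (constraints : List (String × String × Int)) (constraint : String × String × Int), Dom_add_constraint constraints constraint → Spec_add_constraint constraints constraint (add_constraint constraints constraint)

-- ===== LEMMAS AND PROOFS =====

-- first entry (with its index, counting from i) whose name and comparator match
def firstMatch (name comp : String) : List (String × String × Int) → Nat → Option (Nat × String × String × Int)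
  | [], _ => none
  | (n, c, v) :: rest, i =>
      if n == name && c == comp then some (i, n, c, v)
      else firstMatch name comp rest (i + 1)

theorem bScan_eq (name comp : String) (value : Int) (cs : List (String × String × Int)) :
    ∀ (i : Nat) (merge : Option (Nat × String × String × Int)),
      bScan name comp value cs i merge =
        if contradicts cs (name, comp, value) then none
        else some (match merge with
                   | some m => some m
                   | none => firstMatch name comp cs i) := by
  induction cs with
  | nil => intro i merge; cases merge <;> simp [bScan, contradicts, firstMatch]
  | cons hd tl ih =>
      intro i merge
      obtain ⟨n, c, v⟩ := hd
      by_cases hn : n = name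
      · subst hn
        by_cases hc : c = comp
        · subst hc
          have hcontr : contradicts ((n, c, v) :: tl) (n, c, value) = contradicts tl (n, c, value) := by
            simp [contradicts]
          cases merge with
          | none =>
              have hstep : bScan n c value ((n, c, v) :: tl) i none =
                  bScan n c value tl (i + 1) (some (i, n, c, v)) := by simp [bScan]
              have hfm : firstMatch n c ((n, c, v) :: tl) i = some (i, n, c, v) := by
                simp [firstMatch]
              rw [hstep, ih, hcontr, hfm]
          | some m =>
              have hstep : bScan n c value ((n, c, v) :: tl) i (some m) =
                  bScan n c value tl (i + 1) (some m) := by simp [bScan]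
              rw [hstep, ih, hcontr]
        · have h2 : (c != comp) = true := by simp [hc]
          by_cases hcond : ((comp == "<" && decide (value ≤ v)) || (comp == ">" && decide (value ≥ v))) = true
          · have hstep : bScan n comp value ((n, c, v) :: tl) i merge = none := by
              simp [bScan, h2, hcond]
            have hcontr : contradicts ((n, c, v) :: tl) (n, comp, value) = true := by
              simp [contradicts, hcond, Ne.symm hc]
            rw [hstep, hcontr, if_pos rfl]
          · have hcf : ((comp == "<" && decide (value ≤ v)) || (comp == ">" && decide (value ≥ v))) = false :=
              Bool.eq_false_iff.mpr (fun h => hcond h)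
            have hstep : bScan n comp value ((n, c, v) :: tl) i merge =
                bScan n comp value tl (i + 1) merge := by simp [bScan, h2, hcf]
            have hcontr : contradicts ((n, c, v) :: tl) (n, comp, value) = contradicts tl (n, comp, value) := by
              simp [contradicts, hcf]
            rw [hstep, ih, hcontr]
            cases merge with
            | none =>
                have hfm : firstMatch n comp ((n, c, v) :: tl) i = firstMatch n comp tl (i + 1) := by
                  simp [firstMatch, hc]
                rw [hfm]
            | some m => rfl
      · have h1 : (n == name) = false := by simp [hn]
        have h2 : (name == n) = false := by simp; exact fun h => hn h.symm
        have hstep : bScan name comp value ((n, c, v) :: tl) i merge =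
            bScan name comp value tl (i + 1) merge := by simp [bScan, h1]
        have hcontr : contradicts ((n, c, v) :: tl) (name, comp, value) = contradicts tl (name, comp, value) := by
          simp [contradicts, h2]
        have hfm : firstMatch name comp ((n, c, v) :: tl) i = firstMatch name comp tl (i + 1) := by
          simp [firstMatch, h1]
        rw [hstep, ih, hcontr]
        cases merge with
        | none => rw [hfm]
        | some m => rfl

theorem firstMatch_shift (name comp : String) (cs : List (String × String × Int)) :
    ∀ i : Nat, firstMatch name comp cs (i + 1) =
      (firstMatch name comp cs i).map (fun m => (m.1 + 1, m.2)) := by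
  induction cs with
  | nil => intro i; simp [firstMatch]
  | cons hd tl ih =>
      intro i
      obtain ⟨n, c, v⟩ := hd
      by_cases h : (n == name && c == comp) = true
      · simp [firstMatch, h]
      · simp [firstMatch, h, ih]

theorem aMergeLoop_eq (name comp : String) (value : Int) (cs : List (String × String × Int)) :
    aMergeLoop name comp value cs =
      match firstMatch name comp cs 0 with
      | none => none
      | some (i, n, c, v) =>
          some (cs.set i (n, c, if comp == ">" then max v value else min v value)) := by
  induction cs with
  | nil => simp [aMergeLoop, firstMatch]
  | cons hd tl ih =>
      obtain ⟨n, c, v⟩ := hd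
      by_cases h : (n == name && c == comp) = true
      · simp [aMergeLoop, firstMatch, h]
      · simp only [aMergeLoop, firstMatch, h]
        rw [firstMatch_shift, ih]
        cases hf : firstMatch name comp tl 0 with
        | none => simp
        | some m => obtain ⟨i, n', c', v'⟩ := m; simp [List.set]

-- ===== VERDICT (by name: the statement is the Claim_ definition above) =====
theorem add_constraint_spec : Claim_equal_add_constraint := by
  intro constraints constraint _
  obtain ⟨name, comp, value⟩ := constraint
  show add_constraint constraints (name, comp, value) = add_constraint_alt constraints (name, comp, value)
  simp only [add_constraint, add_constraint_alt, bScan_eq, aMergeLoop_eq]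
  by_cases hc : contradicts constraints (name, comp, value)
  · simp [hc]
  · simp only [hc, if_neg, Bool.not_eq_true]
    cases hf : firstMatch name comp constraints 0 with
    | none => simp
    | some m => obtain ⟨i, n, c, v⟩ := m; simp
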